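-- pv_equiv track=rewrite | github.com/ryanmt95/ds-and-algorithms | complete_search/gymnastics.py | cow_gymnastics
-- ===== SOURCE A (Python) =====
-- def cow_gymnastics(practices, cows, rankings):
--     consistent_pairs = set()
--     for i in range(cows):
--         for j in range(i+1, cows):
--             consistent_pairs.add((i+1, j+1))
--
--     pair_map = dict()
--     first_ranking = rankings[0]
--     for i, rank1 in enumerate(first_ranking):
--         for rank2 in first_ranking[i+1:]:
--             pair = tuple(sorted([rank1, rank2]))
--             pair_map[pair] = rank1
--
--     for ranking in rankings[1:]:
--         for i, rank1 in enumerate(ranking):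
--             for rank2 in ranking[i+1:]:
--                 pair = tuple(sorted([rank1, rank2]))
--                 if pair_map[pair] != rank1 and pair in consistent_pairs:
--                     consistent_pairs.remove(pair)
--
--     return len(consistent_pairs)
-- ===== SOURCE B (Python) =====
-- def cow_gymnastics(practices, cows, rankings):
--     pos = [{c: i for i, c in enumerate(r)} for r in rankings]
--     first = pos[0] if pos else {}
--     rest = pos[1:]
--     count = 0
--     for a in range(1, cows + 1):
--         for b in range(a + 1, cows + 1):
--             if not any(a in p and b in p and (p[a] < p[b]) != (first[a] < first[b]) for p in rest):
--                 count += 1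
--     return count
-- ===== Notes on version B (the rewrite author's own statement) =====
-- stated objective: alternative
-- what changed: A builds the full pair set, a sorted-pair->earlier-cow dict over all pairs of the first ranking, and removes pairs from the set while sweeping every later ranking pair-by-pair; B instead builds one cow->index position map per ranking and counts, pair-outer over (a,b) with a<b, the pairs whose relative order in every later ranking that contains both cows matches the first ranking.
-- outside the precondition, e.g. on cow_gymnastics(2, 4, [[2, 1, 2], [2, 2, 1, 2]]): A returns 5, B returns 6
import Mathlib
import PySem

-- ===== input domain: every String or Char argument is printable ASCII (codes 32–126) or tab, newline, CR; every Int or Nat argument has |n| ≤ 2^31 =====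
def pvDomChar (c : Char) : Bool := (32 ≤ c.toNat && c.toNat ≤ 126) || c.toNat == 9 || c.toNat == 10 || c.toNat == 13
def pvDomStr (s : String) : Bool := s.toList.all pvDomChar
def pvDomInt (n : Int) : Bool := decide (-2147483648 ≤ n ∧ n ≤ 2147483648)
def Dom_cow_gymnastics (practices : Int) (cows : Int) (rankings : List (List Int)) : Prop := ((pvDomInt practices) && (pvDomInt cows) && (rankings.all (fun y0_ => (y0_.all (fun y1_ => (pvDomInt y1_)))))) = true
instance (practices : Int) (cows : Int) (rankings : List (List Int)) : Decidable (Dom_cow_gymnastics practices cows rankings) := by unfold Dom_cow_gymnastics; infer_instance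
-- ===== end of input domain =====

-- B replaces A's ranking-outer set-removal sweep by a pair-outer count over per-ranking
-- position maps (objective: alternative structure of similar cost).

-- ===== PORT A =====
-- tuple(sorted([a, b])) for two ints
def pySortPair (a b : Int) : Int × Int := if b < a then (b, a) else (a, b)

def cg_buildPairs (cows : Int) : PySem.Set (Int × Int) :=
  (PySem.List.pyRange 0 cows 1).foldl (fun s i =>
    (PySem.List.pyRange (i + 1) cows 1).foldl (fun s j => PySem.Set.add s (i + 1, j + 1)) s)
    PySem.Set.empty

def cg_buildPairMap (first : List Int) : PySem.Dict (Int × Int) Int :=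
  (PySem.List.enumerate first).foldl (fun d p =>
    (PySem.List.slice first (some (p.1 + 1)) none).foldl
      (fun d rank2 => d.insert (pySortPair p.2 rank2) p.2) d)
    PySem.Dict.empty

-- `pair_map[pair]` raises KeyError on a missing key; Pre_ excludes those inputs, so the
-- getD default is never the value used on admitted inputs.  `consistent_pairs.remove`
-- is guarded by the membership test, so it is Set.discard there.
def cg_processRanking (pm : PySem.Dict (Int × Int) Int)
    (s : PySem.Set (Int × Int)) (r : List Int) : PySem.Set (Int × Int) :=
  (PySem.List.enumerate r).foldl (fun s p =>
    (PySem.List.slice r (some (p.1 + 1)) none).foldl (fun s rank2 =>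
      if pm.getD (pySortPair p.2 rank2) p.2 ≠ p.2 ∧ PySem.Set.contains s (pySortPair p.2 rank2) then
        PySem.Set.discard s (pySortPair p.2 rank2)
      else s) s) s

def cow_gymnastics (practices : Int) (cows : Int) (rankings : List (List Int)) : Int :=
  let consistent0 := cg_buildPairs cows
  -- rankings[0] raises IndexError on []; excluded by Pre_
  let first := (PySem.List.pyGet? rankings 0).getD []
  let pm := cg_buildPairMap first
  let final := (PySem.List.slice rankings (some 1) none).foldl (cg_processRanking pm) consistent0
  PySem.List.len final

-- ===== PORT B =====
def cg_posMap (r : List Int) : PySem.Dict Int Int :=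
  (PySem.List.enumerate r).foldl (fun d p => d.insert p.2 p.1) PySem.Dict.empty

-- `p[a]`, `p[b]`, `first[a]`, `first[b]` in Source B are guarded by the membership tests /
-- Pre_; the getD defaults never decide the Bool below on admitted inputs.
def cow_gymnastics_alt (practices : Int) (cows : Int) (rankings : List (List Int)) : Int :=
  let pos := rankings.map cg_posMap
  let first := pos.headD PySem.Dict.empty
  let rest := PySem.List.slice pos (some 1) none
  (PySem.List.pyRange 1 (cows + 1) 1).foldl (fun count a =>
    (PySem.List.pyRange (a + 1) (cows + 1) 1).foldl (fun count b =>
      if rest.any (fun p => p.contains a && p.contains b &&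
            ((decide (p.getD a 0 < p.getD b 0)) != (decide (first.getD a 0 < first.getD b 0)))) then
        count
      else count + 1) count) 0

-- ===== PRECONDITION & SPEC =====
-- Pre_ excludes: empty `rankings` (A raises IndexError on rankings[0]) and later rankings
-- of length ≥ 2 containing a cow absent from the first ranking (A raises KeyError); it also
-- excludes rankings with duplicate entries, on which A's pair_map last-write-wins value and
-- its (x,x) self-pairs are accidental artefacts of A's implementation.
def Pre_cow_gymnastics (practices : Int) (cows : Int) (rankings : List (List Int)) : Prop :=
  rankings ≠ [] ∧ (∀ r ∈ rankings, r.Nodup) ∧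
    ∀ r ∈ rankings.tail, 2 ≤ r.length → ∀ x ∈ r, x ∈ rankings.headD []
instance (practices : Int) (cows : Int) (rankings : List (List Int)) : Decidable (Pre_cow_gymnastics practices cows rankings) := by unfold Pre_cow_gymnastics; infer_instance

def pvWitness_cow_gymnastics : Int × Int × List (List Int) := (1, 3, [[1, 2, 3], [2, 1, 3]])

def Spec_cow_gymnastics (practices : Int) (cows : Int) (rankings : List (List Int)) (out : Int) : Prop := out = cow_gymnastics_alt practices cows rankings
instance (practices : Int) (cows : Int) (rankings : List (List Int)) (out : Int) : Decidable (Spec_cow_gymnastics practices cows rankings out) := by unfold Spec_cow_gymnastics; infer_instance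

-- ===== CLAIM (what is proved, stated in full; the proofs are below) =====
def Claim_equal_cow_gymnastics : Prop := ∀ (practices : Int) (cows : Int) (rankings : List (List Int)), Dom_cow_gymnastics practices cows rankings → Pre_cow_gymnastics practices cows rankings → Spec_cow_gymnastics practices cows rankings (cow_gymnastics practices cows rankings)

-- ===== LEMMAS AND PROOFS =====

-- basic facts about pySortPair
theorem pySortPair_comm {a b : Int} (h : a ≠ b) : pySortPair a b = pySortPair b a := by
  unfold pySortPair; split_ifs <;> first | omega | rfl

theorem pySortPair_fst_or (a b : Int) :
    (pySortPair a b = (a, b)) ∨ (pySortPair a b = (b, a)) := by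
  unfold pySortPair; split_ifs <;> simp

theorem pySortPair_inj_right {x b y : Int}
    (h : pySortPair x b = pySortPair x y) : b = y := by
  unfold pySortPair at h; split_ifs at h <;> simp [Prod.ext_iff] at h <;> omega

-- generic shape of A's "for i, x in enumerate(r): for y in r[i+1:]" loops
def cgNest {σ : Type} (f : Int → Int → σ → σ) : List Int → σ → σ
  | [], s => s
  | x :: rest, s => cgNest f rest (rest.foldl (fun s y => f x y s) s)

theorem cgNest_eq {σ : Type} (f : Int → Int → σ → σ) :
    ∀ (xs : List Int) (orig : List Int) (n : Nat) (s : σ), orig.drop n = xs →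
      (PySem.List.enumerate xs (n : Int)).foldl (fun s p =>
        (PySem.List.slice orig (some (p.1 + 1)) none).foldl (fun s y => f p.2 y s) s) s
      = cgNest f xs s := by
  intro xs
  induction xs with
  | nil => intro orig n s _; simp [PySem.List.enumerate_nil, cgNest]
  | cons x rest ih =>
    intro orig n s h
    rw [PySem.List.enumerate_cons]
    have hd : orig.drop (n + 1) = rest := by
      have := congrArg List.tail h
      simpa [List.tail_drop] using this
    have hs : PySem.List.slice orig (some ((n : Int) + 1)) none = rest := by
      have hc : ((n : Int) + 1) = ((n + 1 : Nat) : Int) := by push_cast; ring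
      rw [hc, PySem.List.slice_from_natCast, hd]
    simp only [List.foldl_cons, hs]
    have hcast : (n : Int) + 1 = ((n + 1 : Nat) : Int) := by push_cast; ring
    rw [hcast, ih orig (n + 1) _ hd]
    rfl

-- dict helpers
theorem cgDict_contains {κ ν : Type} [BEq κ] (d : PySem.Dict κ ν) (k : κ) :
    d.contains k = (d.get? k).isSome := by
  rw [Bool.eq_iff_iff]
  simp [PySem.Dict.contains, PySem.Dict.get?, List.any_eq, List.find?_isSome]

theorem cg_idx_ne {a b : Int} {l : List Int} (h : a ≠ b) (ha : a ∈ l) (hb : b ∈ l) :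
    l.idxOf a ≠ l.idxOf b := by
  intro he
  have h1 : l.idxOf a < l.length := List.idxOf_lt_length_of_mem ha
  have h2 : l.idxOf b < l.length := List.idxOf_lt_length_of_mem hb
  have ea := List.getElem_idxOf h1
  have eb := List.getElem_idxOf h2
  simp only [he] at ea
  exact h (ea.symm.trans eb)

-- the pair_map inner fold, and its get? characterization
def cgIns (x : Int) (d : PySem.Dict (Int × Int) Int) (y : Int) : PySem.Dict (Int × Int) Int :=
  d.insert (pySortPair x y) x

def cgPMF : Int → Int → PySem.Dict (Int × Int) Int → PySem.Dict (Int × Int) Int :=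
  fun x y d => d.insert (pySortPair x y) x

theorem cg_ins_miss (x : Int) :
    ∀ (l : List Int) (d : PySem.Dict (Int × Int) Int) (q : Int × Int),
      (∀ y ∈ l, q ≠ pySortPair x y) →
      ((l.foldl (cgIns x) d).get? q) = d.get? q := by
  intro l
  induction l with
  | nil => intro d q _; rfl
  | cons y l ih =>
    intro d q h
    rw [List.foldl_cons, ih _ _ (fun z hz => h z (by simp [hz]))]
    exact PySem.Dict.get?_insert_of_ne d x (h y (by simp))

theorem cg_ins_hit (x b : Int) :
    ∀ (l : List Int), b ∈ l → l.Nodup → x ∉ l →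
      ∀ d, ((l.foldl (cgIns x) d).get? (pySortPair x b)) = some x := by
  intro l
  induction l with
  | nil => intro h; simp at h
  | cons y l ih =>
    intro hb hnd hx d
    rcases List.mem_cons.mp hb with rfl | hb'
    · rw [List.foldl_cons, cg_ins_miss]
      · exact PySem.Dict.get?_insert_self d _ x
      · intro z hz hq
        have := pySortPair_inj_right hq
        exact (List.nodup_cons.mp hnd).1 (this ▸ hz)
    · rw [List.foldl_cons]
      exact ih hb' (List.nodup_cons.mp hnd).2 (fun h => hx (List.mem_cons_of_mem _ h)) _

theorem cg_pm_miss :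
    ∀ (xs : List Int) (d : PySem.Dict (Int × Int) Int) (q : Int × Int),
      (q.1 ∉ xs ∨ q.2 ∉ xs) → (cgNest cgPMF xs d).get? q = d.get? q := by
  intro xs
  induction xs with
  | nil => intro d q _; rfl
  | cons x rest ih =>
    intro d q h
    have h' : q.1 ∉ rest ∨ q.2 ∉ rest := by
      rcases h with h | h
      · exact Or.inl (fun hm => h (List.mem_cons_of_mem _ hm))
      · exact Or.inr (fun hm => h (List.mem_cons_of_mem _ hm))
    show (cgNest cgPMF rest _).get? q = d.get? q
    rw [ih _ _ h']
    show ((rest.foldl (cgIns x) d)).get? q = d.get? q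
    apply cg_ins_miss
    intro y hy hq
    rcases pySortPair_fst_or x y with he | he <;> rw [he] at hq <;> subst hq
    · rcases h with h | h
      · exact h (by simp)
      · exact h (by simp [hy])
    · rcases h with h | h
      · exact h (by simp [hy])
      · exact h (by simp)

theorem cg_pm_get :
    ∀ (xs : List Int), xs.Nodup →
      ∀ (d : PySem.Dict (Int × Int) Int) (a b : Int), a ∈ xs → b ∈ xs → a ≠ b →
        (cgNest cgPMF xs d).get? (pySortPair a b)
          = some (if xs.idxOf a < xs.idxOf b then a else b) := by
  intro xs
  induction xs with
  | nil => intro _ d a b ha; simp at ha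
  | cons x rest ih =>
    intro hnd d a b ha hb hab
    obtain ⟨hx, hndr⟩ := List.nodup_cons.mp hnd
    show (cgNest cgPMF rest (rest.foldl (cgIns x) d)).get? (pySortPair a b) = _
    rcases List.mem_cons.mp ha with rfl | ha'
    · have hb' : b ∈ rest := (List.mem_cons.mp hb).resolve_left (fun h => hab h.symm)
      rw [cg_pm_miss _ _ _ (by rcases pySortPair_fst_or a b with he | he <;> rw [he] <;> simp [hx]),
        cg_ins_hit a b rest hb' hndr hx, List.idxOf_cons_self]
      have hbi : List.idxOf b (a :: rest) = rest.idxOf b + 1 := by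
        rw [List.idxOf_cons]
        have hba : (a == b) = false := by simp [hab]
        simp [hba]
      simp [hbi]
    · rcases List.mem_cons.mp hb with rfl | hb'
      · rw [cg_pm_miss _ _ _ (by rcases pySortPair_fst_or a b with he | he <;> rw [he] <;> simp [hx]),
          pySortPair_comm hab, cg_ins_hit b a rest ha' hndr hx, List.idxOf_cons_self]
        have hai : List.idxOf a (b :: rest) = rest.idxOf a + 1 := by
          rw [List.idxOf_cons]
          have hba : (b == a) = false := by simp [Ne.symm hab]
          simp [hba]
        simp [hai]
      · rw [ih hndr _ a b ha' hb' hab]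
        have h1 : List.idxOf a (x :: rest) = rest.idxOf a + 1 := by
          rw [List.idxOf_cons]
          have : (x == a) = false := by simp; intro h; exact hx (h ▸ ha')
          simp [this]
        have h2 : List.idxOf b (x :: rest) = rest.idxOf b + 1 := by
          rw [List.idxOf_cons]
          have : (x == b) = false := by simp; intro h; exact hx (h ▸ hb')
          simp [this]
        simp [h1, h2]

-- all (earlier, later) position pairs of a list, in A's nested-loop order
def cgAllPairs : List Int → List (Int × Int)
  | [] => []
  | x :: rest => rest.map (fun y => (x, y)) ++ cgAllPairs rest

-- pair q is removed by A while processing ranking r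
def cgBad (pm : PySem.Dict (Int × Int) Int) (r : List Int) (q : Int × Int) : Bool :=
  (cgAllPairs r).any (fun pr =>
    (q == pySortPair pr.1 pr.2) && (pm.getD (pySortPair pr.1 pr.2) pr.1 != pr.1))

def cgStep (pm : PySem.Dict (Int × Int) Int) : Int → Int → PySem.Set (Int × Int) → PySem.Set (Int × Int) :=
  fun x y s =>
    if pm.getD (pySortPair x y) x ≠ x ∧ PySem.Set.contains s (pySortPair x y) then
      PySem.Set.discard s (pySortPair x y)
    else s

theorem cg_step_filter (pm : PySem.Dict (Int × Int) Int) (x y : Int) (s : PySem.Set (Int × Int)) :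
    cgStep pm x y s
      = s.filter (fun q => !((q == pySortPair x y) && (pm.getD (pySortPair x y) x != x))) := by
  unfold cgStep
  by_cases hc : pm.getD (pySortPair x y) x = x
  · rw [if_neg (by simp [hc])]
    have : ∀ q : Int × Int, (!((q == pySortPair x y) && (pm.getD (pySortPair x y) x != x))) = true := by
      intro q; simp [hc]
    exact (List.filter_eq_self.mpr (fun q _ => this q)).symm
  · by_cases hm : PySem.Set.contains s (pySortPair x y)
    · rw [if_pos ⟨hc, hm⟩]
      show PySem.Set.discard s _ = _
      unfold PySem.Set.discard
      apply List.filter_congr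
      intro q _
      simp [hc, bne]
    · rw [if_neg (fun h => hm h.2)]
      symm
      rw [List.filter_eq_self]
      intro q hq
      have : q ≠ pySortPair x y := by
        intro h
        subst h
        rw [PySem.Set.contains_iff] at hm
        exact hm hq
      simp [this]

theorem cg_foldl_filter {α β : Type} (p : α → β → Bool) :
    ∀ (l : List α) (s : List β),
      l.foldl (fun s y => s.filter (p y)) s = s.filter (fun q => l.all (fun y => p y q)) := by
  intro l
  induction l with
  | nil => intro s; simp
  | cons y l ih =>
    intro s
    rw [List.foldl_cons, ih, List.filter_filter]
    apply List.filter_congr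
    intro q _
    simp [Bool.and_comm]

theorem cg_nest_filter (pm : PySem.Dict (Int × Int) Int) :
    ∀ (r : List Int) (s : PySem.Set (Int × Int)),
      cgNest (cgStep pm) r s = s.filter (fun q => !cgBad pm r q) := by
  intro r
  induction r with
  | nil =>
    intro s
    show s = _
    symm; rw [List.filter_eq_self]
    intro q _; simp [cgBad, cgAllPairs]
  | cons x rest ih =>
    intro s
    show cgNest (cgStep pm) rest (rest.foldl (fun s y => cgStep pm x y s) s) = _
    have hb : (rest.foldl (fun s y => cgStep pm x y s) s)
        = s.filter (fun q => rest.all (fun y => !((q == pySortPair x y) && (pm.getD (pySortPair x y) x != x)))) := by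
      rw [← cg_foldl_filter (fun y q => !((q == pySortPair x y) && (pm.getD (pySortPair x y) x != x)))]
      apply PySem.List.foldl_congr_mem
      intro s y _
      exact cg_step_filter pm x y s
    rw [hb, ih, List.filter_filter]
    apply List.filter_congr
    intro q _
    rw [Bool.eq_iff_iff]
    simp [cgBad, cgAllPairs, List.any_append, List.any_map, Function.comp_def,
      List.all_eq, List.any_eq]
    constructor
    · rintro ⟨h1, h2⟩ u v huv hq
      rcases huv with ⟨hv, rfl⟩ | huv
      · rcases h2 v hv with h' | h'
        · exact absurd hq h'
        · exact h'
      · exact h1 u v huv hq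
    · intro h
      refine ⟨fun u v huv hq => h u v (Or.inr huv) hq, fun v hv => ?_⟩
      by_cases hq : q = pySortPair x v
      · exact Or.inr (h x v (Or.inl ⟨hv, rfl⟩) hq)
      · exact Or.inl hq

-- membership in cgAllPairs
theorem cg_of_mem_allPairs :
    ∀ (r : List Int), r.Nodup → ∀ pr : Int × Int, pr ∈ cgAllPairs r →
      pr.1 ∈ r ∧ pr.2 ∈ r ∧ r.idxOf pr.1 < r.idxOf pr.2 := by
  intro r
  induction r with
  | nil => intro _ pr h; simp [cgAllPairs] at h
  | cons x rest ih =>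
    intro hnd pr h
    obtain ⟨hx, hndr⟩ := List.nodup_cons.mp hnd
    rcases List.mem_append.mp h with h | h
    · obtain ⟨y, hy, rfl⟩ := List.mem_map.mp h
      have hyx : (x == y) = false := by simp; intro h'; exact hx (h' ▸ hy)
      refine ⟨by simp, by simp [hy], ?_⟩
      simp only [List.idxOf_cons, beq_self_eq_true, cond_true, hyx, cond_false]
      omega
    · obtain ⟨h1, h2, h3⟩ := ih hndr pr h
      have e1 : (x == pr.1) = false := by simp; intro h'; exact hx (h' ▸ h1)
      have e2 : (x == pr.2) = false := by simp; intro h'; exact hx (h' ▸ h2)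
      refine ⟨by simp [h1], by simp [h2], ?_⟩
      simp only [List.idxOf_cons, e1, e2, cond_false]
      omega

theorem cg_mem_allPairs :
    ∀ (r : List Int) (a b : Int), a ∈ r → b ∈ r → r.idxOf a < r.idxOf b →
      (a, b) ∈ cgAllPairs r := by
  intro r
  induction r with
  | nil => intro a b ha; simp at ha
  | cons x rest ih =>
    intro a b ha hb hlt
    by_cases hax : a = x
    · subst hax
      have hba : b ≠ a := by
        intro h; subst h; omega
      have hbr : b ∈ rest := (List.mem_cons.mp hb).resolve_left hba
      exact List.mem_append.mpr (Or.inl (List.mem_map.mpr ⟨b, hbr, rfl⟩))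
    · have hea : (x == a) = false := by simp [Ne.symm hax]
      have har : a ∈ rest := (List.mem_cons.mp ha).resolve_left hax
      have hbx : b ≠ x := by
        intro h; subst h
        simp only [List.idxOf_cons, hea, cond_false, beq_self_eq_true, cond_true] at hlt
        omega
      have hbr : b ∈ rest := (List.mem_cons.mp hb).resolve_left hbx
      have heb : (x == b) = false := by simp [Ne.symm hbx]
      apply List.mem_append.mpr ∘ Or.inr
      apply ih a b har hbr
      simp only [List.idxOf_cons, hea, heb, cond_false] at hlt
      omega

-- position dict characterization
theorem cg_pos_get :
    ∀ (r : List Int), r.Nodup → ∀ (n : Int) (d : PySem.Dict Int Int) (c : Int),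
      ((PySem.List.enumerate r n).foldl (fun d p => d.insert p.2 p.1) d).get? c
        = if c ∈ r then some (n + r.idxOf c) else d.get? c := by
  intro r
  induction r with
  | nil => intro _ n d c; simp [PySem.List.enumerate_nil]
  | cons x rest ih =>
    intro hnd n d c
    obtain ⟨hx, hndr⟩ := List.nodup_cons.mp hnd
    rw [PySem.List.enumerate_cons, List.foldl_cons, ih hndr]
    by_cases hc : c ∈ rest
    · rw [if_pos hc, if_pos (List.mem_cons_of_mem _ hc)]
      have hcx : (x == c) = false := by simp; intro h; exact hx (h ▸ hc)
      rw [List.idxOf_cons]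
      simp [hcx]
      ring
    · rw [if_neg hc]
      by_cases hcx : c = x
      · subst hcx
        rw [if_pos (by simp), PySem.Dict.get?_insert_self, List.idxOf_cons_self]
        simp
      · rw [if_neg (by simp [hcx, hc]), PySem.Dict.get?_insert_of_ne _ _ hcx]

theorem cg_two_le_length {a b : Int} {r : List Int} (hab : a ≠ b) (ha : a ∈ r) (hb : b ∈ r) :
    2 ≤ r.length := by
  match r with
  | [] => simp at ha
  | [u] => simp at ha hb; exact absurd (ha.trans hb.symm) hab
  | u :: v :: t => simp

theorem cg_posMap_get (l : List Int) (hl : l.Nodup) (c : Int) :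
    (cg_posMap l).get? c = if c ∈ l then some ((l.idxOf c : Int)) else none := by
  show ((PySem.List.enumerate l (0:Int)).foldl (fun d p => d.insert p.2 p.1) PySem.Dict.empty).get? c = _
  rw [cg_pos_get l hl 0 PySem.Dict.empty c]
  by_cases h : c ∈ l
  · rw [if_pos h, if_pos h]; simp
  · rw [if_neg h, if_neg h]; rfl

theorem cg_posMap_contains (l : List Int) (hl : l.Nodup) (c : Int) :
    (cg_posMap l).contains c = decide (c ∈ l) := by
  rw [cgDict_contains, cg_posMap_get l hl c]
  by_cases h : c ∈ l <;> simp [h]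

-- the heart: A removes pair (a,b) at ranking r iff B's per-ranking test fires
theorem cg_perRanking (first r : List Int) (hF : first.Nodup) (hr : r.Nodup)
    (hsub : 2 ≤ r.length → ∀ x ∈ r, x ∈ first) (a b : Int) (hab : a < b)
    (pm : PySem.Dict (Int × Int) Int)
    (hpm : ∀ u v : Int, u ∈ first → v ∈ first → u ≠ v →
      pm.get? (pySortPair u v) = some (if first.idxOf u < first.idxOf v then u else v)) :
    cgBad pm r (a, b)
      = ((cg_posMap r).contains a && (cg_posMap r).contains b &&
         ((decide ((cg_posMap r).getD a 0 < (cg_posMap r).getD b 0))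
            != (decide ((cg_posMap first).getD a 0 < (cg_posMap first).getD b 0)))) := by
  have hab' : a ≠ b := by omega
  have hsp : pySortPair a b = (a, b) := by unfold pySortPair; rw [if_neg (by omega)]
  rw [Bool.eq_iff_iff]
  simp only [cgBad, List.any_eq, decide_eq_true_eq, Bool.and_eq_true, beq_iff_eq, bne_iff_ne]
  by_cases hmem : a ∈ r ∧ b ∈ r
  · obtain ⟨har, hbr⟩ := hmem
    have hlen := cg_two_le_length hab' har hbr
    have haf : a ∈ first := hsub hlen a har
    have hbf : b ∈ first := hsub hlen b hbr
    have hget : pm.get? (a, b) = some (if first.idxOf a < first.idxOf b then a else b) := by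
      rw [← hsp]; exact hpm a b haf hbf hab'
    have hgetD : ∀ dflt, pm.getD (a, b) dflt = if first.idxOf a < first.idxOf b then a else b := by
      intro dflt
      unfold PySem.Dict.getD
      rw [hget]; rfl
    have hrga : (cg_posMap r).getD a 0 = (r.idxOf a : Int) := by
      unfold PySem.Dict.getD; rw [cg_posMap_get r hr a, if_pos har]; rfl
    have hrgb : (cg_posMap r).getD b 0 = (r.idxOf b : Int) := by
      unfold PySem.Dict.getD; rw [cg_posMap_get r hr b, if_pos hbr]; rfl
    have hfga : (cg_posMap first).getD a 0 = (first.idxOf a : Int) := by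
      unfold PySem.Dict.getD; rw [cg_posMap_get first hF a, if_pos haf]; rfl
    have hfgb : (cg_posMap first).getD b 0 = (first.idxOf b : Int) := by
      unfold PySem.Dict.getD; rw [cg_posMap_get first hF b, if_pos hbf]; rfl
    have hidxf := cg_idx_ne hab' haf hbf
    rw [cg_posMap_contains r hr a, cg_posMap_contains r hr b, hrga, hrgb, hfga, hfgb]
    simp only [har, hbr, decide_true, Bool.true_and, bne_iff_ne, ne_eq,
      decide_eq_decide, Nat.cast_lt]
    constructor
    · rintro ⟨pr, hprm, hq, hne⟩
      obtain ⟨h1, h2, hlt⟩ := cg_of_mem_allPairs r hr pr hprm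
      rcases pySortPair_fst_or pr.1 pr.2 with he | he <;> rw [he] at hq hne
      · have e1 : pr.1 = a := (congrArg Prod.fst hq).symm
        have e2 : pr.2 = b := (congrArg Prod.snd hq).symm
        rw [← hq, e1] at hne
        rw [hgetD] at hne
        have hnf : ¬ first.idxOf a < first.idxOf b := by
          intro hlt'; rw [if_pos hlt'] at hne; exact hne rfl
        rw [e1, e2] at hlt
        refine ⟨⟨trivial, trivial⟩, fun hiff => hnf (hiff.mp hlt)⟩
      · have e1 : pr.2 = a := (congrArg Prod.fst hq).symm
        have e2 : pr.1 = b := (congrArg Prod.snd hq).symm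
        rw [← hq, e2] at hne
        rw [hgetD] at hne
        have hflt : first.idxOf a < first.idxOf b := by
          by_contra hlt'
          rw [if_neg hlt'] at hne; exact hne rfl
        rw [e1, e2] at hlt
        refine ⟨⟨trivial, trivial⟩, fun hiff => ?_⟩
        have := hiff.mpr hflt
        omega
    · rintro ⟨-, hne⟩
      by_cases hrlt : r.idxOf a < r.idxOf b
      · have hnf : ¬ first.idxOf a < first.idxOf b := fun h => hne (iff_of_true hrlt h)
        refine ⟨(a, b), cg_mem_allPairs r a b har hbr hrlt, by rw [hsp], ?_⟩
        rw [hsp, hgetD, if_neg hnf]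
        omega
      · have hrlt' : r.idxOf b < r.idxOf a := by
          have := cg_idx_ne hab' har hbr
          omega
        have hflt : first.idxOf a < first.idxOf b := by
          by_contra h
          exact hne (iff_of_false hrlt h)
        refine ⟨(b, a), cg_mem_allPairs r b a hbr har hrlt', ?_, ?_⟩
        · show (a, b) = pySortPair b a
          rw [← pySortPair_comm hab', hsp]
        · show pm.getD (pySortPair b a) b ≠ b
          rw [← pySortPair_comm hab', hsp, hgetD, if_pos hflt]
          omega
  · have hcf : ((cg_posMap r).contains a && (cg_posMap r).contains b) = false := by
      rw [cg_posMap_contains r hr a, cg_posMap_contains r hr b]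
      rcases not_and_or.mp hmem with h | h <;> simp [h]
    constructor
    · rintro ⟨pr, hprm, hq, hne⟩
      obtain ⟨h1, h2, _⟩ := cg_of_mem_allPairs r hr pr hprm
      exfalso
      rcases pySortPair_fst_or pr.1 pr.2 with he | he <;> rw [he] at hq
      · have ea : a = pr.1 := congrArg Prod.fst hq
        have eb : b = pr.2 := congrArg Prod.snd hq
        exact hmem ⟨ea ▸ h1, eb ▸ h2⟩
      · have ea : a = pr.2 := congrArg Prod.fst hq
        have eb : b = pr.1 := congrArg Prod.snd hq
        exact hmem ⟨ea ▸ h2, eb ▸ h1⟩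
    · rintro ⟨⟨h1, h2⟩, -⟩
      simp [h1, h2] at hcf

-- the explicit list of pairs (i+1, j+1), 0 ≤ i < j < cows, in A's generation order
def cgPairsList (cows : Int) : List (Int × Int) :=
  (PySem.List.pyRange 0 cows 1).flatMap
    (fun i => (PySem.List.pyRange (i + 1) cows 1).map (fun j => (i + 1, j + 1)))

theorem cg_nodup_pairsList (cows : Int) : (cgPairsList cows).Nodup := by
  unfold cgPairsList
  rw [List.nodup_flatMap]
  constructor
  · intro i _
    exact (PySem.List.nodup_pyRange_one _ _).map
      (fun x y h => by simpa using congrArg Prod.snd h)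
  · apply (PySem.List.pairwise_lt_pyRange_one 0 cows).imp
    intro i1 i2 hlt p hp1 hp2
    obtain ⟨j1, _, rfl⟩ := List.mem_map.mp hp1
    obtain ⟨j2, _, e⟩ := List.mem_map.mp hp2
    have := congrArg Prod.fst e
    simp at this
    omega

theorem cg_foldl_nested {α β σ : Type} (f : σ → α → σ) (g : β → List α) (l : List β) (init : σ) :
    l.foldl (fun s x => (g x).foldl f s) init = (l.flatMap g).foldl f init := by
  induction l generalizing init with
  | nil => rfl
  | cons x l ih => simp [List.flatMap_cons, List.foldl_append, ih]

theorem cg_buildPairs_eq (cows : Int) : cg_buildPairs cows = cgPairsList cows := by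
  unfold cg_buildPairs
  calc (PySem.List.pyRange 0 cows 1).foldl (fun s i =>
        (PySem.List.pyRange (i + 1) cows 1).foldl (fun s j => PySem.Set.add s (i + 1, j + 1)) s)
        PySem.Set.empty
      = (PySem.List.pyRange 0 cows 1).foldl (fun s i =>
          ((PySem.List.pyRange (i + 1) cows 1).map (fun j => (i + 1, j + 1))).foldl PySem.Set.add s)
          PySem.Set.empty := by
        apply PySem.List.foldl_congr_mem
        intro s i _
        rw [List.foldl_map]
    _ = (cgPairsList cows).foldl PySem.Set.add PySem.Set.empty := by
        rw [cg_foldl_nested]; rfl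
    _ = PySem.Set.ofList (cgPairsList cows) := by
        rw [PySem.Set.ofList_eq_foldl]; rfl
    _ = cgPairsList cows := PySem.Set.ofList_eq_self_of_nodup _ (cg_nodup_pairsList cows)

theorem cg_pairs_eq (cows : Int) :
    (PySem.List.pyRange 1 (cows + 1) 1).flatMap
      (fun a => (PySem.List.pyRange (a + 1) (cows + 1) 1).map (fun b => (a, b)))
    = cgPairsList cows := by
  unfold cgPairsList
  rw [PySem.List.pyRange_one 1 (cows + 1), PySem.List.pyRange_one 0 cows,
    List.flatMap_map, List.flatMap_map]
  have h : (cows + 1 - 1).toNat = (cows - 0).toNat := by omega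
  rw [h]
  apply List.flatMap_congr
  intro k _
  rw [PySem.List.pyRange_one, PySem.List.pyRange_one]
  have e : (cows + 1 - (1 + (k : Int) + 1)).toNat = (cows - (0 + (k : Int) + 1)).toNat := by omega
  rw [e, List.map_map, List.map_map]
  apply List.map_congr_left
  intro t _
  simp only [Function.comp_def, Prod.ext_iff]
  constructor <;> ring

theorem cg_all_not {α : Type} (l : List α) (g : α → Bool) :
    l.all (fun r => !g r) = !l.any g := by
  induction l with
  | nil => rfl
  | cons x l ih => simp [ih]

theorem cg_if_flip (b : Bool) (c : Int) :
    (if b = true then c else c + 1) = (if (!b) = true then c + 1 else c) := by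
  cases b <;> simp

theorem cg_count_fold {α : Type} (p : α → Bool) (l : List α) :
    l.foldl (fun c x => if p x = true then c else c + 1) (0 : Int)
      = (l.countP (fun x => !p x) : Int) := by
  rw [PySem.List.foldl_congr_mem l _ (fun c x => if (!p x) = true then c + 1 else c) 0
    (fun c x _ => cg_if_flip (p x) c)]
  rw [PySem.List.foldl_if_add_one]
  simp

theorem cg_any_congr_mem {α : Type} {l : List α} {p q : α → Bool}
    (h : ∀ x ∈ l, p x = q x) : l.any p = l.any q := by
  induction l with
  | nil => rfl
  | cons x l ih =>
    simp only [List.any_cons]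
    rw [h x (by simp), ih (fun y hy => h y (by simp [hy]))]

theorem cg_mem_pairsList {cows : Int} {q : Int × Int} (h : q ∈ cgPairsList cows) :
    q.1 < q.2 := by
  unfold cgPairsList at h
  obtain ⟨i, hi, hq⟩ := List.mem_flatMap.mp h
  obtain ⟨j, hj, rfl⟩ := List.mem_map.mp hq
  rw [PySem.List.mem_pyRange_one] at hj
  simp
  omega

-- ===== VERDICT (by name: the statement is the Claim_ definition above) =====
theorem cow_gymnastics_spec : Claim_equal_cow_gymnastics := by
  intro practices cows rankings _ hpre
  unfold Spec_cow_gymnastics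
  obtain ⟨hne, hnd, hsub⟩ := hpre
  obtain ⟨f, t, rfl⟩ : ∃ f t, rankings = f :: t := by
    cases rankings with
    | nil => exact absurd rfl hne
    | cons f t => exact ⟨f, t, rfl⟩
  have hF : f.Nodup := hnd f (by simp)
  -- the pair_map, in cgNest form
  have hpm_eq : cg_buildPairMap f = cgNest cgPMF f PySem.Dict.empty := by
    unfold cg_buildPairMap
    have := cgNest_eq cgPMF f f 0 PySem.Dict.empty (by simp)
    simpa using this
  have hpm : ∀ u v : Int, u ∈ f → v ∈ f → u ≠ v →
      (cg_buildPairMap f).get? (pySortPair u v) = some (if f.idxOf u < f.idxOf v then u else v) := by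
    intro u v hu hv huv
    rw [hpm_eq]
    exact cg_pm_get f hF _ u v hu hv huv
  -- A's side
  have hA : cow_gymnastics practices cows (f :: t)
      = ((cgPairsList cows).countP
          (fun q => t.all (fun r => !cgBad (cg_buildPairMap f) r q)) : Int) := by
    unfold cow_gymnastics
    simp only [PySem.List.pyGet?_zero_cons, Option.getD_some, PySem.List.slice_from_one]
    show PySem.List.len ((t : List (List Int)).foldl (cg_processRanking (cg_buildPairMap f)) (cg_buildPairs cows)) = _
    have hproc : ∀ (s : PySem.Set (Int × Int)) (r : List Int),
        cg_processRanking (cg_buildPairMap f) s r = s.filter (fun q => !cgBad (cg_buildPairMap f) r q) := by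
      intro s r
      rw [← cg_nest_filter]
      unfold cg_processRanking
      have := cgNest_eq (cgStep (cg_buildPairMap f)) r r 0 s (by simp)
      simpa [cgStep] using this
    calc PySem.List.len ((t : List (List Int)).foldl (cg_processRanking (cg_buildPairMap f)) (cg_buildPairs cows))
        = PySem.List.len (t.foldl (fun s r => s.filter (fun q => !cgBad (cg_buildPairMap f) r q)) (cg_buildPairs cows)) := by
          congr 1
          apply PySem.List.foldl_congr_mem
          intro s r _
          exact hproc s r
      _ = PySem.List.len ((cg_buildPairs cows).filter (fun q => t.all (fun r => !cgBad (cg_buildPairMap f) r q))) := by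
          rw [cg_foldl_filter (fun r q => !cgBad (cg_buildPairMap f) r q)]
      _ = _ := by
          rw [cg_buildPairs_eq, PySem.List.len_eq, List.countP_eq_length_filter]
  -- B's side
  have hB : cow_gymnastics_alt practices cows (f :: t)
      = ((cgPairsList cows).countP
          (fun q => !( (t.map cg_posMap).any (fun p => p.contains q.1 && p.contains q.2 &&
              ((decide (p.getD q.1 0 < p.getD q.2 0))
                != (decide ((cg_posMap f).getD q.1 0 < (cg_posMap f).getD q.2 0)))))) : Int) := by
    unfold cow_gymnastics_alt
    simp only [List.map_cons, List.headD_cons, PySem.List.slice_from_one, List.tail_cons]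
    calc (PySem.List.pyRange 1 (cows + 1) 1).foldl (fun count a =>
            (PySem.List.pyRange (a + 1) (cows + 1) 1).foldl (fun count b =>
              if (t.map cg_posMap).any (fun p => p.contains a && p.contains b &&
                    ((decide (p.getD a 0 < p.getD b 0))
                      != (decide ((cg_posMap f).getD a 0 < (cg_posMap f).getD b 0)))) then
                count
              else count + 1) count) (0 : Int)
        = (PySem.List.pyRange 1 (cows + 1) 1).foldl (fun count a =>
            ((PySem.List.pyRange (a + 1) (cows + 1) 1).map (fun b => (a, b))).foldl (fun count q =>
              if (t.map cg_posMap).any (fun p => p.contains q.1 && p.contains q.2 &&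
                    ((decide (p.getD q.1 0 < p.getD q.2 0))
                      != (decide ((cg_posMap f).getD q.1 0 < (cg_posMap f).getD q.2 0)))) then
                count
              else count + 1) count) (0 : Int) := by
          apply PySem.List.foldl_congr_mem
          intro c a _
          rw [List.foldl_map]
      _ = ((PySem.List.pyRange 1 (cows + 1) 1).flatMap
            (fun a => (PySem.List.pyRange (a + 1) (cows + 1) 1).map (fun b => (a, b)))).foldl
            (fun count q =>
              if (t.map cg_posMap).any (fun p => p.contains q.1 && p.contains q.2 &&
                    ((decide (p.getD q.1 0 < p.getD q.2 0))
                      != (decide ((cg_posMap f).getD q.1 0 < (cg_posMap f).getD q.2 0)))) then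
                count
              else count + 1) (0 : Int) := by
          rw [cg_foldl_nested]
      _ = _ := by
          rw [cg_pairs_eq, cg_count_fold]
  rw [hA, hB, Nat.cast_inj]
  apply List.countP_congr
  intro q hq
  obtain ⟨a, b⟩ := q
  have hab : a < b := cg_mem_pairsList hq
  rw [cg_all_not, List.any_map]
  have hcongr : ∀ r ∈ t, cgBad (cg_buildPairMap f) r (a, b)
      = ((fun p => p.contains a && p.contains b &&
          ((decide (p.getD a 0 < p.getD b 0))
            != (decide ((cg_posMap f).getD a 0 < (cg_posMap f).getD b 0)))) ∘ cg_posMap) r := by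
    intro r hr
    exact cg_perRanking f r hF (hnd r (by simp [hr]))
      (fun hlen x hx => hsub r (by simpa using hr) hlen x hx) a b hab (cg_buildPairMap f) hpm
  have hany : t.any (fun r => cgBad (cg_buildPairMap f) r (a, b))
      = t.any (((fun p => p.contains a && p.contains b &&
          ((decide (p.getD a 0 < p.getD b 0))
            != (decide ((cg_posMap f).getD a 0 < (cg_posMap f).getD b 0)))) ∘ cg_posMap)) := by
    exact cg_any_congr_mem hcongr
  rw [hany]
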